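-- pv_equiv track=rewrite | github.com/shashidharmk/Mathtype | App.py | newmat
-- ===== SOURCE A (Python) =====
-- def matt(s):
--     h='''<math xmlns="http://www.w3.org/1998/Math/MathML">'''
--     t="</math>"
--     return (h+s+t)
--
-- def newmat(k):
--  l=[]
--  for alpha in k:
--   l.append(alpha)
--  final=[]
--  dig=[]
--  for let in l:
--   if str.isdigit(let):
--    dig.append(let)
--   elif issign(let):
--    final.append("".join(dig))
--    dig.clear()
--    final.append(let)
--   else:
--    dig.append(let)
--  final.append("".join(dig))
--  math=[]
--  for d in final:
--   if issign(d):
--    if d=="/":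
--     math.append("<mo>"+"&#247;"+"</mo>")
--    elif d=="*":
--     math.append("<mo>"+"&#215;"+"</mo>")
--    elif d==">":
--     math.append("<mo>"+"&#62;"+"</mo>")
--     #math.append('''<mo>&#160;</mo><menclose notation="box"><mo>&#160;</mo><mo>&#160;</mo><mo>&#62;</mo><mo>&#160;</mo></menclose><mo>&#160;</mo>''')
--    elif d=="<":
--     math.append("<mo>"+"&#60;"+"</mo>")
--     #math.append('''<mo>&#160;</mo><menclose notation="box"><mo>&#160;</mo><mo>&#160;</mo><mo>&#60;</mo><mo>&#160;</mo></menclose><mo>&#160;</mo>''')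
--    elif d=="$":
--     math.append('''<mo>&#160;</mo><mo>&#160;</mo><mo>&#160;</mo><menclose notation="box"><mo>&#160;</mo><mo>&#160;</mo><mo>&#160;</mo><mo>&#160;</mo><mo>&#160;</mo><mo>&#160;</mo></menclose><mo>&#160;</mo><mo>&#160;</mo>''')
--    else:
--     math.append("<mo>"+d+"</mo>")
--   else:
--    math.append("<mn>"+d+"</mn>")
--  return matt("".join(math))
--
-- def issign(sign):
--     if sign=="=" :
--        return True
--     elif sign=="?" :
--        return True
--     elif sign=="+" :
--        return True
--     elif sign=="-" :
--        return True
--     elif sign=="*" :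
--        return True
--     elif sign=="/" :
--        return True
--     elif sign=="(" :
--        return True
--     elif sign==")" :
--        return True
--     elif sign=="@" :
--        return True
--     elif sign=="$" :
--        return True
--     elif sign=="<" :
--        return True
--     elif sign==">" :
--        return True
--     else:
--        return False
-- ===== SOURCE B (Python) =====
-- _SIGNS = "=?+-*/()@$<>"
-- _BOX = '<mo>&#160;</mo><mo>&#160;</mo><mo>&#160;</mo><menclose notation="box"><mo>&#160;</mo><mo>&#160;</mo><mo>&#160;</mo><mo>&#160;</mo><mo>&#160;</mo><mo>&#160;</mo></menclose><mo>&#160;</mo><mo>&#160;</mo>'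
-- _SPECIAL = {
--     "/": "<mo>&#247;</mo>",
--     "*": "<mo>&#215;</mo>",
--     ">": "<mo>&#62;</mo>",
--     "<": "<mo>&#60;</mo>",
--     "$": _BOX,
-- }
--
-- def newmat(k):
--     parts = ['<math xmlns="http://www.w3.org/1998/Math/MathML">']
--     buf = []
--     for c in k:
--         if c in _SIGNS:
--             parts.append("<mn>" + "".join(buf) + "</mn>")
--             buf.clear()
--             parts.append(_SPECIAL.get(c, "<mo>" + c + "</mo>"))
--         else:
--             buf.append(c)
--     parts.append("<mn>" + "".join(buf) + "</mn>")
--     parts.append("</math>")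
--     return "".join(parts)
-- ===== Notes on version B (the rewrite author's own statement) =====
-- stated objective: simpler
-- what changed: B replaces A's three sequential list passes (explode to char list, split into segments flushed at signs, render each segment) by a single pass keeping a digit/letter buffer that emits markup directly, with special-sign markup in a constant dict instead of an if/elif chain; same O(n) asymptotics, the constant-factor win comes from skipping the intermediate lists.
import Mathlib
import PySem

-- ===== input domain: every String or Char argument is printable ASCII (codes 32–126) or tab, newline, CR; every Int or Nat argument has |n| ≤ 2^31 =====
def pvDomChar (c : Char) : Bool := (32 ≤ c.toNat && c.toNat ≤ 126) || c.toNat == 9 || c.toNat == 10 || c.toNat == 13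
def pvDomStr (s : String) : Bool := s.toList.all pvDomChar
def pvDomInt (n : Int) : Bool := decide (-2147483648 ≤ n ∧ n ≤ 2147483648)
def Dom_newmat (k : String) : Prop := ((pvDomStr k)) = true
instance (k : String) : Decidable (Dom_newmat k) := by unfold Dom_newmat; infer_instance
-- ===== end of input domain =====

set_option maxRecDepth 8192

-- B does A's three list passes (explode, split at signs, render) in one pass with a
-- digit/letter buffer and a sign-markup dict; objective: simpler, same cost.


-- ===== PORT A =====
-- Strings are handled as List Char throughout (Python's 1-char strings and "".join of
-- lists of 1-char strings are exactly the char lists; string literals are written as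
-- char-list literals, which Lean's kernel can reduce); the final wrap rebuilds a String.

-- helper issign, ported as A's if/elif equality chain on (1-char) strings
def issignA (s : List Char) : Bool :=
  if s = ['='] then true else if s = ['?'] then true else if s = ['+'] then true
  else if s = ['-'] then true else if s = ['*'] then true else if s = ['/'] then true
  else if s = ['('] then true else if s = [')'] then true else if s = ['@'] then true
  else if s = ['$'] then true else if s = ['<'] then true else if s = ['>'] then true
  else false

def mathHeader : List Char :=
  ['<','m','a','t','h',' ','x','m','l','n','s','=','"','h','t','t','p',':','/','/','w','w','w','.','w','3','.','o','r','g','/','1','9','9','8','/','M','a','t','h','/','M','a','t','h','M','L','"','>']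

-- helper matt: h + s + t
def mattA (s : List Char) : List Char :=
  mathHeader ++ s ++ ['<','/','m','a','t','h','>']

-- the big literal appended for '$' (same string in both Pythons)
def boxMarkup : List Char :=
  ['<','m','o','>','&','#','1','6','0',';','<','/','m','o','>','<','m','o','>','&','#','1','6','0',';','<','/','m','o','>','<','m','o','>','&','#','1','6','0',';','<','/','m','o','>','<','m','e','n','c','l','o','s','e',' ','n','o','t','a','t','i','o','n','=','"','b','o','x','"','>','<','m','o','>','&','#','1','6','0',';','<','/','m','o','>','<','m','o','>','&','#','1','6','0',';','<','/','m','o','>','<','m','o','>','&','#','1','6','0',';','<','/','m','o','>','<','m','o','>','&','#','1','6','0',';','<','/','m','o','>','<','m','o','>','&','#','1','6','0',';','<','/','m','o','>','<','m','o','>','&','#','1','6','0',';','<','/','m','o','>','<','/','m','e','n','c','l','o','s','e','>','<','m','o','>','&','#','1','6','0',';','<','/','m','o','>','<','m','o','>','&','#','1','6','0',';','<','/','m','o','>']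

-- body of the second loop (state = (final, dig)): digit → append to dig,
-- sign → flush dig and append the sign, else → append to dig
def aStep (st : List (List Char) × List Char) (c : Char) : List (List Char) × List Char :=
  if PySem.Chars.strIsdigit [c] then (st.1, st.2 ++ [c])
  else if issignA [c] then (st.1 ++ [st.2] ++ [[c]], [])
  else (st.1, st.2 ++ [c])

-- body of the third loop: the if/elif chain over an entry d of final
def renderA (d : List Char) : List Char :=
  if issignA d then
    if d = ['/'] then ['<','m','o','>'] ++ ['&','#','2','4','7',';'] ++ ['<','/','m','o','>']
    else if d = ['*'] then ['<','m','o','>'] ++ ['&','#','2','1','5',';'] ++ ['<','/','m','o','>']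
    else if d = ['>'] then ['<','m','o','>'] ++ ['&','#','6','2',';'] ++ ['<','/','m','o','>']
    else if d = ['<'] then ['<','m','o','>'] ++ ['&','#','6','0',';'] ++ ['<','/','m','o','>']
    else if d = ['$'] then boxMarkup
    else ['<','m','o','>'] ++ d ++ ['<','/','m','o','>']
  else ['<','m','n','>'] ++ d ++ ['<','/','m','n','>']

def newmat (k : String) : String :=
  -- l = [] ; for alpha in k: l.append(alpha)
  let l : List Char := k.toList.foldl (fun acc c => acc ++ [c]) []
  -- second loop over l with state (final, dig)
  let st : List (List Char) × List Char := l.foldl aStep ([], [])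
  let final : List (List Char) := st.1 ++ [st.2]   -- final.append("".join(dig))
  -- third loop: math = []; for d in final: math.append(<rendered d>)
  let math : List (List Char) := final.foldl (fun acc d => acc ++ [renderA d]) []
  -- return matt("".join(math))
  String.ofList (mattA (math.foldl (fun acc d => acc ++ d) []))

-- ===== PORT B =====
def signsB : List Char := ['=','?','+','-','*','/','(',')','@','$','<','>']

def specialB : PySem.Dict (List Char) (List Char) :=
  PySem.Dict.ofList
    [(['/'], ['<','m','o','>','&','#','2','4','7',';','<','/','m','o','>']),
     (['*'], ['<','m','o','>','&','#','2','1','5',';','<','/','m','o','>']),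
     (['>'], ['<','m','o','>','&','#','6','2',';','<','/','m','o','>']),
     (['<'], ['<','m','o','>','&','#','6','0',';','<','/','m','o','>']),
     (['$'], boxMarkup)]

-- the single pass: emitted parts accumulated in `out`, pending digit/letter chars in `buf`
def bGo : List Char → List Char → List Char → List Char
  | [], out, buf => out ++ (['<','m','n','>'] ++ buf ++ ['<','/','m','n','>'])
  | c :: cs, out, buf =>
    if signsB.contains c then
      bGo cs (out ++ (['<','m','n','>'] ++ buf ++ ['<','/','m','n','>'])
                  ++ specialB.getD [c] (['<','m','o','>'] ++ [c] ++ ['<','/','m','o','>'])) []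
    else bGo cs out (buf ++ [c])

def newmat_alt (k : String) : String :=
  String.ofList (mathHeader ++ bGo k.toList [] [] ++ ['<','/','m','a','t','h','>'])

-- ===== PRECONDITION & SPEC =====
def Spec_newmat (k : String) (out : String) : Prop := out = newmat_alt k
instance (k : String) (out : String) : Decidable (Spec_newmat k out) := by unfold Spec_newmat; infer_instance

-- ===== CLAIM (what is proved, stated in full; the proofs are below) =====
def Claim_equal_newmat : Prop := ∀ (k : String), Dom_newmat k → Spec_newmat k (newmat k)

-- ===== LEMMAS AND PROOFS =====

theorem sign_cases (c : Char) (hc : signsB.contains c = true) :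
    c = '=' ∨ c = '?' ∨ c = '+' ∨ c = '-' ∨ c = '*' ∨ c = '/' ∨ c = '(' ∨
      c = ')' ∨ c = '@' ∨ c = '$' ∨ c = '<' ∨ c = '>' := by
  simp only [signsB, List.contains_cons, List.contains_nil, Bool.or_eq_true, beq_iff_eq,
    Bool.or_false] at hc
  tauto

theorem issignA_singleton (c : Char) : issignA [c] = signsB.contains c := by
  by_cases h : signsB.contains c = true
  · rcases sign_cases c h with h'|h'|h'|h'|h'|h'|h'|h'|h'|h'|h'|h' <;> subst h' <;> decide
  · have h' : signsB.contains c = false := by simp_all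
    rw [h']
    have hn : ¬(c = '=' ∨ c = '?' ∨ c = '+' ∨ c = '-' ∨ c = '*' ∨ c = '/' ∨ c = '(' ∨
        c = ')' ∨ c = '@' ∨ c = '$' ∨ c = '<' ∨ c = '>') := fun hx => h (by
      simp only [signsB, List.contains_cons, List.contains_nil, Bool.or_eq_true, beq_iff_eq,
        Bool.or_false]
      tauto)
    push Not at hn
    obtain ⟨h1,h2,h3,h4,h5,h6,h7,h8,h9,h10,h11,h12⟩ := hn
    simp only [issignA, List.cons.injEq, and_true, h1,h2,h3,h4,h5,h6,h7,h8,h9,h10,h11,h12,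
      if_false]

theorem issignA_long (a b : Char) (l : List Char) : issignA (a :: b :: l) = false := by
  simp only [issignA, List.cons.injEq, reduceCtorEq, and_false, if_false]

-- a buffer ending in a non-sign char never matches a sign singleton
theorem issignA_buf_snoc (buf : List Char) (c : Char) (hc : signsB.contains c = false) :
    issignA (buf ++ [c]) = false := by
  cases buf with
  | nil => simpa [issignA_singleton] using hc
  | cons a t => cases t with
    | nil => exact issignA_long a c []
    | cons b t => simpa using issignA_long a b (t ++ [c])

theorem sign_not_digit (c : Char) (hc : signsB.contains c = true) :
    PySem.Chars.strIsdigit [c] = false := by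
  rcases sign_cases c hc with h|h|h|h|h|h|h|h|h|h|h|h <;> subst h <;> decide

theorem aStep_sign (fin : List (List Char)) (dig : List Char) (c : Char)
    (hc : signsB.contains c = true) : aStep (fin, dig) c = (fin ++ [dig] ++ [[c]], []) := by
  simp only [aStep, sign_not_digit c hc, Bool.false_eq_true, if_false, issignA_singleton, hc,
    if_true]

theorem aStep_nonsign (fin : List (List Char)) (dig : List Char) (c : Char)
    (hc : signsB.contains c = false) : aStep (fin, dig) c = (fin, dig ++ [c]) := by
  simp only [aStep, issignA_singleton, hc, Bool.false_eq_true, if_false, ite_self]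

-- for each sign character, A's render chain equals B's dict lookup
theorem render_sign (c : Char) (hc : signsB.contains c = true) :
    renderA [c] = specialB.getD [c] (['<','m','o','>'] ++ [c] ++ ['<','/','m','o','>']) := by
  rcases sign_cases c hc with h|h|h|h|h|h|h|h|h|h|h|h <;> subst h <;> decide

theorem render_buf (buf : List Char) (h : issignA buf = false) :
    renderA buf = ['<','m','n','>'] ++ buf ++ ['<','/','m','n','>'] := by
  simp only [renderA, h, Bool.false_eq_true, if_false]

-- A's split loop with accumulated prefix
theorem split_acc (cs : List Char) (fin : List (List Char)) (dig : List Char) :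
    cs.foldl aStep (fin, dig)
      = (fin ++ (cs.foldl aStep ([], dig)).1, (cs.foldl aStep ([], dig)).2) := by
  induction cs generalizing fin dig with
  | nil => simp
  | cons c cs ih =>
    simp only [List.foldl_cons]
    by_cases hc : signsB.contains c = true
    · rw [aStep_sign fin dig c hc, aStep_sign [] dig c hc,
        ih (fin ++ [dig] ++ [[c]]) [], ih ([] ++ [dig] ++ [[c]]) []]
      simp
    · have hc' : signsB.contains c = false := by simp_all
      rw [aStep_nonsign fin dig c hc', aStep_nonsign [] dig c hc']
      exact ih fin (dig ++ [c])

-- the fused pass equals render-after-split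
theorem key (cs : List Char) (out buf : List Char) (hbuf : issignA buf = false) :
    bGo cs out buf
      = out ++ (((cs.foldl aStep ([], buf)).1 ++ [(cs.foldl aStep ([], buf)).2]).map renderA).flatten := by
  induction cs generalizing out buf with
  | nil => simp [bGo, render_buf buf hbuf]
  | cons c cs ih =>
    simp only [bGo, List.foldl_cons]
    by_cases hs : signsB.contains c = true
    · rw [if_pos hs, aStep_sign [] buf c hs, split_acc cs ([] ++ [buf] ++ [[c]]) [],
        ih _ [] (by decide)]
      simp [render_buf buf hbuf, render_sign c hs]
    · have hs' : signsB.contains c = false := by simp_all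
      rw [if_neg hs, aStep_nonsign [] buf c hs']
      exact ih out (buf ++ [c]) (issignA_buf_snoc buf c hs')

theorem foldl_append_id (xs : List (List Char)) (init : List Char) :
    xs.foldl (fun acc d => acc ++ d) init = init ++ xs.flatten := by
  induction xs generalizing init with
  | nil => simp
  | cons x t ih => simp [ih, List.append_assoc]

-- ===== VERDICT (by name: the statement is the Claim_ definition above) =====
theorem newmat_spec : Claim_equal_newmat := by
  intro k _
  show newmat k = newmat_alt k
  simp only [newmat, newmat_alt, PySem.List.foldl_append_singleton, List.nil_append,
    PySem.List.foldl_append_singleton_eq_map, foldl_append_id]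
  rw [key k.toList [] [] (by decide)]
  simp [mattA]
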